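-- pv_equiv track=rewrite | github.com/jpmedras/attemps_net | src/graphs/questions_graph.py | _commom_students
-- ===== SOURCE A (Python) =====
-- def _commom_students(student_questions):
--     commom = {}
--
--     for question_u, students_u in student_questions.items():
--         for question_v, students_v in student_questions.items():
--             if question_u not in commom:
--                 commom[question_u] = {}
--
--             commom[question_u][question_v] = len(students_u & students_v)
--
--     return commom
-- ===== SOURCE B (Python) =====
-- def _commom_students(student_questions):
--     # Invert to student -> questions, then count co-occurrences per student;
--     # pre-fill a Q x Q zero table so every pair is present in the output.
--     items = list(student_questions.items())
--     questions = [q for q, _ in items]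
--
--     commom = {u: {v: 0 for v in questions} for u in questions}
--
--     pairs = [(s, q) for q, studs in items for s in studs]
--     owners = {}
--     for s, q in pairs:
--         owners[s] = owners.get(s, []) + [q]
--
--     for qs in owners.values():
--         for u in qs:
--             for v in qs:
--                 commom[u][v] += 1
--
--     return commom
-- ===== Notes on version B (the rewrite author's own statement) =====
-- stated objective: faster
-- what changed: Instead of intersecting every pair of student sets (Q^2 set intersections), B inverts the input into a student -> questions map and, per student, increments the co-occurrence counters of every pair of that student's questions over a pre-filled Q x Q zero table.
import Mathlib
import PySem

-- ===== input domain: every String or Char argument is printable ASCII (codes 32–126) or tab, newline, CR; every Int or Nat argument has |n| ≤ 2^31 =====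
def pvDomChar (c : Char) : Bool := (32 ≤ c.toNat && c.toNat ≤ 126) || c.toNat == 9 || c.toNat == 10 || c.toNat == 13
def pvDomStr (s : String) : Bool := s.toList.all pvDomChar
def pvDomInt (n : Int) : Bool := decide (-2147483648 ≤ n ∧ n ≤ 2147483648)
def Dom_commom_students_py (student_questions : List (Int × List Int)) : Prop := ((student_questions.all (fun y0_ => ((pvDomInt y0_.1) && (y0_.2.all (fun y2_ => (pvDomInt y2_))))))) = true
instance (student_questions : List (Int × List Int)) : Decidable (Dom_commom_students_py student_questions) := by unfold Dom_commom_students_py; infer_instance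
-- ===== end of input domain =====

-- B inverts the input to a student -> questions map and counts co-occurrences per student
-- over a pre-filled zero table, instead of intersecting every pair of student sets (objective: faster).

-- ===== PORT A =====
-- shared input marshalling: the dict[int, set[int]] the Python function receives,
-- as its ordered items list (duplicate keys: last value wins; values deduplicated)
def pvToItems (student_questions : List (Int × List Int)) : List (Int × List Int) :=
  (PySem.Dict.ofList (student_questions.map (fun p => (p.1, PySem.Set.ofList p.2)))).items

def commom_students_py (student_questions : List (Int × List Int)) : List (Int × List (Int × Int)) :=
  let items := pvToItems student_questions
  let commom : PySem.Dict Int (PySem.Dict Int Int) :=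
    items.foldl (fun c pu =>
      items.foldl (fun c pv =>
        let c' := if c.contains pu.1 then c else c.insert pu.1 PySem.Dict.empty
        c'.modify pu.1 PySem.Dict.empty
          (fun m => m.insert pv.1 (PySem.Set.len (PySem.Set.inter pu.2 pv.2)))) c)
      PySem.Dict.empty
  commom.items.map (fun p => (p.1, p.2.items))

-- ===== PORT B =====
def commom_students_py_alt (student_questions : List (Int × List Int)) : List (Int × List (Int × Int)) :=
  let items := pvToItems student_questions
  let questions := items.map (fun p => p.1)
  -- commom = {u: {v: 0 for v in questions} for u in questions}
  let commom : PySem.Dict Int (PySem.Dict Int Int) :=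
    questions.foldl (fun c u =>
      c.insert u (questions.foldl (fun r v => r.insert v (0 : Int)) PySem.Dict.empty))
      PySem.Dict.empty
  -- pairs = [(s, q) for q, studs in items for s in studs]
  let pairs : List (Int × Int) := items.flatMap (fun p => p.2.map (fun s => (s, p.1)))
  -- owners[s] = owners.get(s, []) + [q]
  let owners : PySem.Dict Int (List Int) :=
    pairs.foldl (fun o sp => o.modify sp.1 [] (fun l => l ++ [sp.2])) PySem.Dict.empty
  -- for qs in owners.values(): for u in qs: for v in qs: commom[u][v] += 1
  let commom := owners.values.foldl (fun c qs =>
      qs.foldl (fun c u =>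
        qs.foldl (fun c v =>
          c.modify u PySem.Dict.empty (fun r => r.modify v 0 (· + 1))) c) c)
    commom
  commom.items.map (fun p => (p.1, p.2.items))

-- ===== PRECONDITION & SPEC =====
def Spec_commom_students_py (student_questions : List (Int × List Int)) (out : List (Int × List (Int × Int))) : Prop := out = commom_students_py_alt student_questions
instance (student_questions : List (Int × List Int)) (out : List (Int × List (Int × Int))) : Decidable (Spec_commom_students_py student_questions out) := by unfold Spec_commom_students_py; infer_instance

-- ===== CLAIM (what is proved, stated in full; the proofs are below) =====
def Claim_equal_commom_students_py : Prop := ∀ (student_questions : List (Int × List Int)), Dom_commom_students_py student_questions → Spec_commom_students_py student_questions (commom_students_py student_questions)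

-- ===== LEMMAS AND PROOFS =====

-- ---------- generic helpers ----------

theorem pv_insert_get?_self {κ ν : Type} [BEq κ] [LawfulBEq κ] (d : PySem.Dict κ ν) {k : κ} {v : ν}
    (hnd : d.keys.Nodup) (h : d.get? k = some v) : d.insert k v = d := by
  have hc : d.contains k = true := by rw [PySem.Dict.contains_eq_isSome_get?, h]; rfl
  apply PySem.Dict.ext
  rw [PySem.Dict.items_insert_of_contains d v hc]
  conv_rhs => rw [← List.map_id d.items]
  refine List.map_congr_left (fun p hp => ?_)
  obtain ⟨p1, p2⟩ := p
  by_cases hk : p1 = k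
  · subst hk
    have := PySem.Dict.get?_of_mem_items d hp hnd
    rw [h] at this
    have hv : v = p2 := Option.some.inj this
    simp [hv]
  · simp [hk]

-- ---------- characterising port A ----------

def pvCnt (su sv : List Int) : Int := PySem.Set.len (PySem.Set.inter su sv)

def pvRowStep (su : List Int) : PySem.Dict Int Int → Int × List Int → PySem.Dict Int Int :=
  fun r q => r.insert q.1 (pvCnt su q.2)

def pvStepA (su : List Int) (u : Int) :
    PySem.Dict Int (PySem.Dict Int Int) → Int × List Int → PySem.Dict Int (PySem.Dict Int Int) :=
  fun c q =>
    (if c.contains u then c else c.insert u PySem.Dict.empty).modify u PySem.Dict.empty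
      (fun m => m.insert q.1 (pvCnt su q.2))

theorem pv_portA_eq_fold (sq : List (Int × List Int)) :
    commom_students_py sq =
      ((pvToItems sq).foldl (fun c pu => (pvToItems sq).foldl (pvStepA pu.2 pu.1) c)
        PySem.Dict.empty).items.map (fun p => (p.1, p.2.items)) := rfl

theorem pv_innerA_cont (su : List Int) (u : Int) (M : List (Int × List Int)) :
    ∀ (c : PySem.Dict Int (PySem.Dict Int Int)) (r : PySem.Dict Int Int),
      c.keys.Nodup → c.get? u = some r →
      M.foldl (pvStepA su u) c = c.insert u (M.foldl (pvRowStep su) r) := by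
  induction M with
  | nil => intro c r hnd h; exact (pv_insert_get?_self c hnd h).symm
  | cons q M ih =>
    intro c r hnd h
    have hc : c.contains u = true := by rw [PySem.Dict.contains_eq_isSome_get?, h]; rfl
    have hstep : pvStepA su u c q = c.insert u (pvRowStep su r q) := by
      simp only [pvStepA, hc, if_pos, PySem.Dict.modify,
        PySem.Dict.getD_of_get?_eq_some _ _ h, pvRowStep]
    rw [List.foldl_cons, hstep,
      ih _ (pvRowStep su r q) (PySem.Dict.nodup_keys_insert _ _ _ hnd)
        (PySem.Dict.get?_insert_self _ _ _),
      PySem.Dict.insert_insert_self, List.foldl_cons]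

theorem pv_innerA_fresh (su : List Int) (u : Int) (M : List (Int × List Int)) (hM : M ≠ [])
    (c : PySem.Dict Int (PySem.Dict Int Int)) (hnd : c.keys.Nodup)
    (hc : c.contains u = false) :
    M.foldl (pvStepA su u) c = c.insert u (M.foldl (pvRowStep su) PySem.Dict.empty) := by
  obtain ⟨q, M', rfl⟩ : ∃ q M', M = q :: M' := by
    cases M with
    | nil => exact absurd rfl hM
    | cons q M' => exact ⟨q, M', rfl⟩
  have hstep : pvStepA su u c q = c.insert u (pvRowStep su PySem.Dict.empty q) := by
    simp only [pvStepA, hc, Bool.false_eq_true, ite_false, PySem.Dict.modify,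
      PySem.Dict.getD_insert_self, PySem.Dict.insert_insert_self, pvRowStep]
  rw [List.foldl_cons, hstep,
    pv_innerA_cont su u M' _ _ (PySem.Dict.nodup_keys_insert _ _ _ hnd)
      (PySem.Dict.get?_insert_self _ _ _),
    PySem.Dict.insert_insert_self, List.foldl_cons]

theorem pv_outerA (M : List (Int × List Int)) (hM : M ≠ []) :
    ∀ (K : List (Int × List Int)) (c : PySem.Dict Int (PySem.Dict Int Int)),
      c.keys.Nodup → (K.map Prod.fst).Nodup → (∀ p ∈ K, c.contains p.1 = false) →
      K.foldl (fun c pu => M.foldl (pvStepA pu.2 pu.1) c) c =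
        K.foldl (fun c pu => c.insert pu.1 (M.foldl (pvRowStep pu.2) PySem.Dict.empty)) c := by
  intro K
  induction K with
  | nil => intro c _ _ _; rfl
  | cons p K ih =>
    intro c hnd hK hfresh
    rw [List.foldl_cons, List.foldl_cons,
      pv_innerA_fresh p.2 p.1 M hM c hnd (hfresh p List.mem_cons_self)]
    simp only [List.map_cons, List.nodup_cons] at hK
    refine ih _ (PySem.Dict.nodup_keys_insert _ _ _ hnd) hK.2 (fun p' hp' => ?_)
    have hne : p'.1 ≠ p.1 := by
      intro hEq
      exact hK.1 (hEq ▸ List.mem_map_of_mem hp')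
    rw [PySem.Dict.contains_insert]
    simp [hne, hfresh p' (List.mem_cons_of_mem _ hp')]

theorem pv_nodup_fst (sq : List (Int × List Int)) : ((pvToItems sq).map Prod.fst).Nodup :=
  PySem.Dict.nodup_keys_ofList _

theorem pv_A_canon (sq : List (Int × List Int)) :
    commom_students_py sq =
      (pvToItems sq).map (fun pu =>
        (pu.1, (pvToItems sq).map (fun pv => (pv.1, pvCnt pu.2 pv.2)))) := by
  rw [pv_portA_eq_fold]
  by_cases hL : pvToItems sq = []
  · rw [hL]; rfl
  · rw [pv_outerA (pvToItems sq) hL (pvToItems sq) PySem.Dict.empty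
        (by simp [PySem.Dict.keys, PySem.Dict.empty]) (pv_nodup_fst sq)
        (fun p _ => PySem.Dict.contains_empty _),
      PySem.Dict.items_foldl_insert_fresh (pvToItems sq) Prod.fst
        (fun pu => (pvToItems sq).foldl (pvRowStep pu.2) PySem.Dict.empty) PySem.Dict.empty
        (fun p _ => PySem.Dict.contains_empty _) (pv_nodup_fst sq)]
    have hie : (PySem.Dict.empty : PySem.Dict Int (PySem.Dict Int Int)).items = [] := rfl
    rw [hie, List.nil_append, List.map_map]
    refine List.map_congr_left (fun pu _ => ?_)
    simp only [Function.comp]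
    congr 1
    have hrow := PySem.Dict.items_foldl_insert_fresh (pvToItems sq) Prod.fst
      (fun q => pvCnt pu.2 q.2) PySem.Dict.empty
      (fun p _ => PySem.Dict.contains_empty _) (pv_nodup_fst sq)
    simpa [pvRowStep] using hrow

-- ---------- characterising port B ----------

def pvPairs (sq : List (Int × List Int)) : List (Int × Int) :=
  (pvToItems sq).flatMap (fun p => p.2.map (fun s => (s, p.1)))

def pvQsOf (sq : List (Int × List Int)) (s : Int) : List Int :=
  ((pvPairs sq).filter (fun p => p.1 == s)).map (fun p => p.2)

def pvS (sq : List (Int × List Int)) : List Int :=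
  PySem.Set.ofList ((pvPairs sq).map (fun p => p.1))

def pvCellB (sq : List (Int × List Int)) (u v : Int) : Int :=
  ((pvS sq).map (fun s => ((pvQsOf sq s).count u : Int) * ((pvQsOf sq s).count v : Int))).sum

def pvCell (c : PySem.Dict Int (PySem.Dict Int Int)) (u v : Int) : Int :=
  (c.getD u PySem.Dict.empty).getD v 0

def pvStepB (u' : Int) :
    PySem.Dict Int (PySem.Dict Int Int) → Int → PySem.Dict Int (PySem.Dict Int Int) :=
  fun c v' => c.modify u' PySem.Dict.empty (fun r => r.modify v' 0 (· + 1))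

def pvBig : PySem.Dict Int (PySem.Dict Int Int) → List Int → PySem.Dict Int (PySem.Dict Int Int) :=
  fun c qs => qs.foldl (fun c u => qs.foldl (pvStepB u) c) c

theorem pv_cell_mod (c : PySem.Dict Int (PySem.Dict Int Int)) (u v u' v' : Int) :
    pvCell (pvStepB u' c v') u v = pvCell c u v + (if u = u' ∧ v = v' then 1 else 0) := by
  simp only [pvCell, pvStepB, PySem.Dict.getD_modify]
  by_cases h1 : u = u'
  · subst h1
    rw [if_pos rfl, PySem.Dict.getD_modify]
    by_cases h2 : v = v' <;> simp [h2]
  · rw [if_neg h1]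
    simp [h1]

theorem pv_cell_inner (u' : Int) (qs : List Int) :
    ∀ c u v, pvCell (qs.foldl (pvStepB u') c) u v
      = pvCell c u v + (if u = u' then (qs.count v : Int) else 0) := by
  induction qs with
  | nil => intro c u v; simp
  | cons x qs ih =>
    intro c u v
    rw [List.foldl_cons, ih, pv_cell_mod]
    by_cases h : u = u'
    · by_cases h2 : v = x
      · simp [h, h2]
        omega
      · simp [h, h2, List.count_cons]
        omega
    · simp [h]

theorem pv_cell_outer (qs' qs : List Int) :
    ∀ c u v, pvCell (qs.foldl (fun c u'' => qs'.foldl (pvStepB u'') c) c) u v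
      = pvCell c u v + (qs.count u : Int) * (qs'.count v : Int) := by
  induction qs with
  | nil => intro c u v; simp
  | cons x qs ih =>
    intro c u v
    rw [List.foldl_cons, ih, pv_cell_inner]
    by_cases h : u = x
    · simp [h]
      ring
    · simp [h, List.count_cons]
      omega

theorem pv_cell_big (V : List (List Int)) :
    ∀ c u v, pvCell (V.foldl pvBig c) u v
      = pvCell c u v + (V.map (fun qs => ((qs.count u : Int) * (qs.count v : Int)))).sum := by
  induction V with
  | nil => intro c u v; simp
  | cons qs V ih =>
    intro c u v
    rw [List.foldl_cons, ih]
    have hout : pvCell (pvBig c qs) u v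
        = pvCell c u v + (qs.count u : Int) * (qs.count v : Int) := pv_cell_outer qs qs c u v
    rw [hout, List.map_cons, List.sum_cons]
    ring

def pvPInv (Q : List Int) (c : PySem.Dict Int (PySem.Dict Int Int)) : Prop :=
  c.keys = Q ∧ ∀ u ∈ Q, (c.getD u PySem.Dict.empty).keys = Q

theorem pv_P_mod {Q : List Int} {c : PySem.Dict Int (PySem.Dict Int Int)} {u' v' : Int}
    (hP : pvPInv Q c) (hu : u' ∈ Q) (hv : v' ∈ Q) : pvPInv Q (pvStepB u' c v') := by
  obtain ⟨hk, hr⟩ := hP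
  have hcu : c.contains u' = true := (PySem.Dict.contains_iff_mem_keys c u').mpr (hk ▸ hu)
  have hrowmem : v' ∈ (c.getD u' PySem.Dict.empty).keys := (hr u' hu) ▸ hv
  have hrowc : (c.getD u' PySem.Dict.empty).contains v' = true :=
    (PySem.Dict.contains_iff_mem_keys _ _).mpr hrowmem
  constructor
  · rw [pvStepB, PySem.Dict.keys_modify, PySem.Dict.keys_insert_of_contains _ _ hcu, hk]
  · intro u hu2
    rw [pvStepB]
    have : ((c.modify u' PySem.Dict.empty (fun r => r.modify v' 0 (· + 1))).getD u PySem.Dict.empty)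
        = if u = u' then (c.getD u' PySem.Dict.empty).modify v' 0 (· + 1)
          else c.getD u PySem.Dict.empty := PySem.Dict.getD_modify c u' u _ _
    rw [this]
    split_ifs with h
    · rw [PySem.Dict.keys_modify, PySem.Dict.keys_insert_of_contains _ _ hrowc, hr u' hu]
    · exact hr u hu2

theorem pv_P_inner {Q : List Int} {u' : Int} (qs : List Int) (hu : u' ∈ Q)
    (hqs : ∀ x ∈ qs, x ∈ Q) :
    ∀ c, pvPInv Q c → pvPInv Q (qs.foldl (pvStepB u') c) := by
  induction qs with
  | nil => intro c h; exact h
  | cons x qs ih =>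
    intro c h
    exact ih (fun y hy => hqs y (List.mem_cons_of_mem _ hy)) _
      (pv_P_mod h hu (hqs x List.mem_cons_self))

theorem pv_P_outer {Q : List Int} (qs' qs : List Int) (hqs : ∀ x ∈ qs, x ∈ Q)
    (hqs' : ∀ x ∈ qs', x ∈ Q) :
    ∀ c, pvPInv Q c → pvPInv Q (qs.foldl (fun c u'' => qs'.foldl (pvStepB u'') c) c) := by
  induction qs with
  | nil => intro c h; exact h
  | cons x qs ih =>
    intro c h
    exact ih (fun y hy => hqs y (List.mem_cons_of_mem _ hy)) _
      (pv_P_inner qs' (hqs x List.mem_cons_self) hqs' c h)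

theorem pv_P_big {Q : List Int} (V : List (List Int)) (hV : ∀ qs ∈ V, ∀ x ∈ qs, x ∈ Q) :
    ∀ c, pvPInv Q c → pvPInv Q (V.foldl pvBig c) := by
  induction V with
  | nil => intro c h; exact h
  | cons qs V ih =>
    intro c h
    exact ih (fun q hq => hV q (List.mem_cons_of_mem _ hq)) _
      (pv_P_outer qs qs (hV qs List.mem_cons_self) (hV qs List.mem_cons_self) c h)

-- the zero row: every lookup with default 0 gives 0
theorem pv_zrow_getD (l : List Int) :
    ∀ (r : PySem.Dict Int Int), (∀ v, r.getD v 0 = 0) →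
      ∀ v, (l.foldl (fun r v => r.insert v (0 : Int)) r).getD v 0 = 0 := by
  induction l with
  | nil => intro r h v; exact h v
  | cons x l ih =>
    intro r h v
    refine ih _ (fun w => ?_) v
    rw [PySem.Dict.getD_insert]
    split_ifs <;> simp [h]

-- ---------- assembling port B ----------

def pvZ (sq : List (Int × List Int)) : PySem.Dict Int (PySem.Dict Int Int) :=
  ((pvToItems sq).map (fun p => p.1)).foldl
    (fun c u => c.insert u
      (((pvToItems sq).map (fun p => p.1)).foldl
        (fun r v => r.insert v (0 : Int)) PySem.Dict.empty))
    PySem.Dict.empty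

def pvOwners (sq : List (Int × List Int)) : PySem.Dict Int (List Int) :=
  (pvPairs sq).foldl (fun o sp => o.modify sp.1 [] (fun l => l ++ [sp.2])) PySem.Dict.empty

theorem pv_portB_eq_fold (sq : List (Int × List Int)) :
    commom_students_py_alt sq =
      ((pvOwners sq).values.foldl pvBig (pvZ sq)).items.map (fun p => (p.1, p.2.items)) := rfl

def pvQ (sq : List (Int × List Int)) : List Int := (pvToItems sq).map (fun p => p.1)

theorem pv_nodup_Q (sq : List (Int × List Int)) : (pvQ sq).Nodup := pv_nodup_fst sq

theorem pv_zrow_items (sq : List (Int × List Int)) :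
    ((pvQ sq).foldl (fun r v => r.insert v (0 : Int)) PySem.Dict.empty).items
      = (pvQ sq).map (fun v => (v, (0 : Int))) := by
  have := PySem.Dict.items_foldl_insert_fresh (pvQ sq) id (fun _ => (0 : Int)) PySem.Dict.empty
    (fun a _ => PySem.Dict.contains_empty a) (by simpa using pv_nodup_Q sq)
  simpa using this

theorem pv_Z_items (sq : List (Int × List Int)) :
    (pvZ sq).items = (pvQ sq).map (fun u =>
      (u, (pvQ sq).foldl (fun r v => r.insert v (0 : Int)) PySem.Dict.empty)) := by
  have := PySem.Dict.items_foldl_insert_fresh (pvQ sq) id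
    (fun _ => (pvQ sq).foldl (fun r v => r.insert v (0 : Int)) PySem.Dict.empty) PySem.Dict.empty
    (fun a _ => PySem.Dict.contains_empty a) (by simpa using pv_nodup_Q sq)
  simpa [pvZ, pvQ] using this

theorem pv_Z_keys (sq : List (Int × List Int)) : (pvZ sq).keys = pvQ sq := by
  rw [PySem.Dict.keys, pv_Z_items, List.map_map]
  exact (List.map_congr_left (fun a _ => rfl)).trans (List.map_id _)

theorem pv_Z_getD_of_mem (sq : List (Int × List Int)) {u : Int} (hu : u ∈ pvQ sq) :
    (pvZ sq).getD u PySem.Dict.empty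
      = (pvQ sq).foldl (fun r v => r.insert v (0 : Int)) PySem.Dict.empty := by
  refine PySem.Dict.getD_of_get?_eq_some _ _ (PySem.Dict.get?_of_mem_items _ ?_ ?_)
  · rw [pv_Z_items]; exact List.mem_map_of_mem hu
  · rw [pv_Z_keys]; exact pv_nodup_Q sq

theorem pv_PInv_Z (sq : List (Int × List Int)) : pvPInv (pvQ sq) (pvZ sq) := by
  refine ⟨pv_Z_keys sq, fun u hu => ?_⟩
  rw [pv_Z_getD_of_mem sq hu, PySem.Dict.keys, pv_zrow_items, List.map_map]
  exact (List.map_congr_left (fun a _ => rfl)).trans (List.map_id _)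

theorem pv_cell_Z (sq : List (Int × List Int)) (u v : Int) : pvCell (pvZ sq) u v = 0 := by
  unfold pvCell
  by_cases hu : u ∈ pvQ sq
  · rw [pv_Z_getD_of_mem sq hu]
    exact pv_zrow_getD (pvQ sq) PySem.Dict.empty (fun w => PySem.Dict.getD_empty w 0) v
  · have : (pvZ sq).contains u = false := by
      rw [← Bool.not_eq_true, PySem.Dict.contains_iff_mem_keys, pv_Z_keys]; exact hu
    rw [PySem.Dict.getD_of_not_contains _ _ this]
    exact PySem.Dict.getD_empty v 0

theorem pv_owners_keys (sq : List (Int × List Int)) : (pvOwners sq).keys = pvS sq := by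
  have := PySem.Dict.keys_foldl_modify_key (pvPairs sq) Prod.fst ([] : List Int)
    (fun _ sp => fun l => l ++ [sp.2]) PySem.Dict.empty
  simpa [pvOwners, pvS, PySem.Set.update_nil_left, PySem.Dict.keys] using this

theorem pv_owners_nodup_keys (sq : List (Int × List Int)) : (pvOwners sq).keys.Nodup := by
  exact PySem.Dict.nodup_keys_foldl_modify_key (pvPairs sq) Prod.fst ([] : List Int)
    (fun _ sp => fun l => l ++ [sp.2]) PySem.Dict.empty (by simp [PySem.Dict.keys, PySem.Dict.empty])

theorem pv_owners_getD (sq : List (Int × List Int)) (s : Int) :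
    (pvOwners sq).getD s [] = pvQsOf sq s := by
  have := PySem.Dict.getD_foldl_modify_append (pvPairs sq) PySem.Dict.empty s
  simpa [pvOwners, pvQsOf, PySem.Dict.getD_empty] using this

theorem pv_owners_values (sq : List (Int × List Int)) :
    (pvOwners sq).values = (pvS sq).map (fun s => pvQsOf sq s) := by
  rw [PySem.Dict.values_eq_map_keys _ (pv_owners_nodup_keys sq) ([] : List Int),
    pv_owners_keys]
  exact List.map_congr_left (fun s _ => pv_owners_getD sq s)

theorem pv_qsOf_sub (sq : List (Int × List Int)) (s : Int) :
    ∀ x ∈ pvQsOf sq s, x ∈ pvQ sq := by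
  intro x hx
  simp only [pvQsOf, List.mem_map, List.mem_filter] at hx
  obtain ⟨p, ⟨hp, _⟩, rfl⟩ := hx
  simp only [pvPairs, List.mem_flatMap, List.mem_map] at hp
  obtain ⟨pu, hpu, s', _, rfl⟩ := hp
  exact List.mem_map_of_mem hpu

theorem pv_final_cell (sq : List (Int × List Int)) (u v : Int) :
    pvCell ((pvOwners sq).values.foldl pvBig (pvZ sq)) u v = pvCellB sq u v := by
  rw [pv_cell_big, pv_cell_Z, pv_owners_values, List.map_map, zero_add]
  rfl

theorem pv_final_PInv (sq : List (Int × List Int)) :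
    pvPInv (pvQ sq) ((pvOwners sq).values.foldl pvBig (pvZ sq)) := by
  refine pv_P_big _ (fun qs hqs x hx => ?_) _ (pv_PInv_Z sq)
  rw [pv_owners_values] at hqs
  obtain ⟨s, _, rfl⟩ := List.mem_map.mp hqs
  exact pv_qsOf_sub sq s x hx

theorem pv_B_canon (sq : List (Int × List Int)) :
    commom_students_py_alt sq =
      (pvToItems sq).map (fun pu =>
        (pu.1, (pvToItems sq).map (fun pv => (pv.1, pvCellB sq pu.1 pv.1)))) := by
  rw [pv_portB_eq_fold]
  obtain ⟨hkeys, hrows⟩ := pv_final_PInv sq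
  set F := (pvOwners sq).values.foldl pvBig (pvZ sq) with hF
  rw [PySem.Dict.items_eq_map_keys F (hkeys ▸ pv_nodup_Q sq) PySem.Dict.empty, hkeys]
  rw [List.map_map]
  simp only [pvQ, List.map_map]
  refine List.map_congr_left (fun pu hpu => ?_)
  simp only [Function.comp]
  congr 1
  have hrow := hrows pu.1 (List.mem_map_of_mem hpu)
  rw [PySem.Dict.items_eq_map_keys (F.getD pu.1 PySem.Dict.empty)
      (hrow ▸ pv_nodup_Q sq) 0, hrow]
  simp only [pvQ, List.map_map]
  refine List.map_congr_left (fun pv _ => ?_)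
  simp only [Function.comp]
  congr 1
  exact pv_final_cell sq pu.1 pv.1

-- ---------- the per-cell counting identity ----------

theorem pv_val_nodup (sq : List (Int × List Int)) {u : Int} {su : List Int}
    (h : (u, su) ∈ pvToItems sq) : su.Nodup := by
  have hmem : (u, su) ∈ sq.map (fun p => (p.1, PySem.Set.ofList p.2)) := by
    -- every item of Dict.ofList ps is one of ps
    suffices H : ∀ (ps : List (Int × List Int)) (d : PySem.Dict Int (List Int)) (p : Int × List Int),
        p ∈ (ps.foldl (fun acc q => acc.insert q.1 q.2) d).items → p ∈ ps ∨ p ∈ d.items by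
      have := H (sq.map (fun p => (p.1, PySem.Set.ofList p.2))) PySem.Dict.empty (u, su)
        (by simpa [pvToItems, PySem.Dict.ofList, PySem.Dict.update] using h)
      simpa [PySem.Dict.empty] using this
    intro ps
    induction ps with
    | nil => intro d p hp; exact Or.inr hp
    | cons q ps ih =>
      intro d p hp
      rcases ih _ p hp with h1 | h1
      · exact Or.inl (List.mem_cons_of_mem _ h1)
      · rcases (PySem.Dict.mem_items_insert d q.1 q.2 p).mp h1 with h2 | h2
        · exact Or.inl (by rw [h2]; exact List.mem_cons_self)
        · exact Or.inr h2.1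
  obtain ⟨p, _, hp⟩ := List.mem_map.mp hmem
  have : su = PySem.Set.ofList p.2 := (Prod.mk.injEq _ _ _ _ ▸ hp).2.symm
  rw [this]
  exact PySem.Set.nodup_ofList p.2

theorem pv_sum_if_key {β : Type} (u : Int) (su : β) (f : β → Nat) :
    ∀ (L : List (Int × β)), (L.map Prod.fst).Nodup → (u, su) ∈ L →
      (L.map (fun p => if p.1 = u then f p.2 else 0)).sum = f su := by
  intro L
  induction L with
  | nil => intro _ h; cases h
  | cons p t ih =>
    intro hnd hmem
    simp only [List.map_cons, List.nodup_cons] at hnd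
    rcases List.mem_cons.mp hmem with hmem | hmem
    · have hp1 : p.1 = u := by rw [← hmem]
      have hz : ∀ q ∈ t, (if q.1 = u then f q.2 else 0) = 0 := by
        intro q hq
        have hne : q.1 ≠ u := by
          intro hEq
          exact hnd.1 (by rw [hp1, ← hEq]; exact List.mem_map_of_mem hq)
        simp [hne]
      rw [List.map_cons, List.sum_cons, if_pos hp1, List.map_congr_left hz]
      have hp2 : p.2 = su := by rw [← hmem]
      simp [hp2]
    · have hp1 : p.1 ≠ u := by
        intro hEq
        exact hnd.1 (hEq ▸ List.mem_map_of_mem hmem)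
      rw [List.map_cons, List.sum_cons, if_neg hp1, Nat.zero_add]
      exact ih hnd.2 hmem

theorem pv_count_qsOf (sq : List (Int × List Int)) (s u : Int) {su : List Int}
    (hmem : (u, su) ∈ pvToItems sq) :
    (pvQsOf sq s).count u = su.count s := by
  have h1 : (pvQsOf sq s).count u = (pvPairs sq).count (s, u) := by
    simp only [pvQsOf, List.count, List.countP_map, List.countP_filter]
    refine List.countP_congr (fun p _ => ?_)
    obtain ⟨ps, pq⟩ := p
    simp only [Function.comp]
    by_cases hs : ps = s <;> by_cases hq : pq = u <;> simp [hs, hq, Prod.ext_iff]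
  have h2 : (pvPairs sq).count (s, u)
      = ((pvToItems sq).map (fun p => if p.1 = u then p.2.count s else 0)).sum := by
    rw [pvPairs, List.count_flatMap]
    congr 1
    refine List.map_congr_left (fun p _ => ?_)
    simp only [Function.comp]
    by_cases h : p.1 = u
    · rw [if_pos h, List.count, List.countP_map, List.count]
      refine List.countP_congr (fun s' _ => ?_)
      simp only [Function.comp]
      by_cases hs : s' = s <;> simp [hs, Prod.ext_iff, h]
    · rw [if_neg h, List.count_eq_zero]
      intro hc
      obtain ⟨s', _, hEq⟩ := List.mem_map.mp hc
      exact h ((Prod.mk.injEq _ _ _ _ ▸ hEq).2)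
  rw [h1, h2, pv_sum_if_key u su (fun l => l.count s) (pvToItems sq) (pv_nodup_fst sq) hmem]

theorem pv_sum_ind (su sv : List Int) :
    ∀ (S : List Int),
      (S.map (fun s => ((if s ∈ su then (1 : Nat) else 0) : Int)
        * ((if s ∈ sv then (1 : Nat) else 0) : Int))).sum
      = (S.countP (fun s => decide (s ∈ su) && decide (s ∈ sv)) : Int) := by
  intro S
  induction S with
  | nil => simp
  | cons x S ih =>
    simp only [List.map_cons, List.sum_cons, ih, List.countP_cons]
    by_cases h1 : x ∈ su <;> by_cases h2 : x ∈ sv <;> simp [h1, h2] <;> omega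

theorem pv_su_sub_S (sq : List (Int × List Int)) {u : Int} {su : List Int}
    (hmem : (u, su) ∈ pvToItems sq) : ∀ s ∈ su, s ∈ pvS sq := by
  intro s hs
  rw [pvS, PySem.Set.mem_ofList]
  refine List.mem_map.mpr ⟨(s, u), ?_, rfl⟩
  rw [pvPairs, List.mem_flatMap]
  exact ⟨(u, su), hmem, List.mem_map.mpr ⟨s, hs, rfl⟩⟩

theorem pv_cell_eq (sq : List (Int × List Int)) (pu pv : Int × List Int)
    (hu : pu ∈ pvToItems sq) (hv : pv ∈ pvToItems sq) :
    pvCellB sq pu.1 pv.1 = pvCnt pu.2 pv.2 := by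
  obtain ⟨u, su⟩ := pu
  obtain ⟨v, sv⟩ := pv
  simp only
  have hsu : su.Nodup := pv_val_nodup sq hu
  have hsv : sv.Nodup := pv_val_nodup sq hv
  have hSnd : (pvS sq).Nodup := by
    have := pv_owners_nodup_keys sq
    rwa [pv_owners_keys] at this
  -- rewrite each count as an indicator
  have hcnt : ∀ (s : Int) (w : Int) (sw : List Int), (w, sw) ∈ pvToItems sq → sw.Nodup →
      (pvQsOf sq s).count w = if s ∈ sw then 1 else 0 := by
    intro s w sw hw hnd
    rw [pv_count_qsOf sq s w hw]
    by_cases h : s ∈ sw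
    · rw [if_pos h]; exact List.count_eq_one_of_mem hnd h
    · rw [if_neg h]; exact List.count_eq_zero.mpr h
  have hmapeq :
      ((pvS sq).map (fun s => ((pvQsOf sq s).count u : Int) * ((pvQsOf sq s).count v : Int)))
      = ((pvS sq).map (fun s => ((if s ∈ su then (1 : Nat) else 0) : Int)
          * ((if s ∈ sv then (1 : Nat) else 0) : Int))) := by
    refine List.map_congr_left (fun s _ => ?_)
    rw [hcnt s u su hu hsu, hcnt s v sv hv hsv]
    by_cases h1 : s ∈ su <;> by_cases h2 : s ∈ sv <;> simp [h1, h2]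
  rw [pvCellB, hmapeq, pv_sum_ind su sv]
  -- now count the common elements
  have hlen : ((pvS sq).countP (fun s => decide (s ∈ su) && decide (s ∈ sv)))
      = (PySem.Set.inter su sv).length := by
    rw [List.countP_eq_length_filter]
    have hA : ((pvS sq).filter (fun s => decide (s ∈ su) && decide (s ∈ sv))).Nodup :=
      hSnd.filter _
    have hB : (PySem.Set.inter su sv).Nodup := by
      simpa [PySem.Set.inter] using hsu.filter _
    have hmemiff : ∀ x, x ∈ (pvS sq).filter (fun s => decide (s ∈ su) && decide (s ∈ sv))
        ↔ x ∈ PySem.Set.inter su sv := by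
      intro x
      simp only [List.mem_filter, Bool.and_eq_true, decide_eq_true_eq, PySem.Set.inter,
        PySem.Set.contains, List.contains_iff_mem]
      constructor
      · rintro ⟨_, h1, h2⟩; exact ⟨h1, by simpa using h2⟩
      · rintro ⟨h1, h2⟩
        exact ⟨pv_su_sub_S sq hu x h1, h1, by simpa using h2⟩
    have := List.toFinset_card_of_nodup hA
    rw [← this, ← List.toFinset_card_of_nodup hB]
    congr 1
    ext x
    simp only [List.mem_toFinset]
    exact hmemiff x
  rw [hlen, pvCnt, PySem.Set.len]

-- ===== VERDICT (by name: the statement is the Claim_ definition above) =====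
theorem commom_students_py_spec : Claim_equal_commom_students_py := by
  intro sq _
  unfold Spec_commom_students_py
  rw [pv_A_canon, pv_B_canon]
  refine (List.map_congr_left (fun pu hpu => ?_)).symm
  congr 1
  refine List.map_congr_left (fun pv hpv => ?_)
  congr 1
  exact pv_cell_eq sq pu pv hpu hpv
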